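-- pv_equiv track=rewrite | github.com/ArthurWalker/Tech-Interview-Prep | Stripe/Exercises/MinimumPenalty.py | earlier_minimum_penalty
-- ===== SOURCE A (Python) =====
-- def earlier_minimum_penalty(customers: str) -> int:
--     pentaly_dictary = {}
--     # iterate through the customers to calcaluta penalty for each hour
--     for hour in range(len(customers)+1):
--         # if shop open + no customer
--         shop_open = customers[:hour]
--         shop_close = customers[hour:]
--         penalty_hour = 0
--         for open_hour in shop_open:
--             if open_hour == 'N':
--                 penalty_hour+=1
--         for close_hour in shop_close:
--             if close_hour == 'Y':
--                 penalty_hour+=1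
--         pentaly_dictary[hour] = penalty_hour
--
--
--     min_penalty = min(pentaly_dictary.values())
--     for hour,penalty in pentaly_dictary.items():
--         if penalty == min_penalty:
--             return hour
-- ===== SOURCE B (Python) =====
-- def earlier_minimum_penalty(customers: str) -> int:
--     # One pass: penalty for closing at hour 0 is the number of 'Y's; moving the
--     # closing hour past character c changes the penalty by -1 ('Y') or +1 ('N').
--     pen = sum(c == 'Y' for c in customers)
--     best = pen
--     best_hour = 0
--     for i, c in enumerate(customers):
--         if c == 'Y':
--             pen -= 1
--         elif c == 'N':
--             pen += 1
--         if pen < best: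
--             best = pen
--             best_hour = i + 1
--     return best_hour
-- ===== Notes on version B (the rewrite author's own statement) =====
-- stated objective: faster
-- what changed: Replaced the per-hour recount over both string halves (and the dict of all penalties plus a final min-and-scan) with a single left-to-right pass that maintains a running penalty (start = number of 'Y', then -1 per 'Y' / +1 per 'N' crossed) and tracks the earliest minimum.
import Mathlib
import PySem

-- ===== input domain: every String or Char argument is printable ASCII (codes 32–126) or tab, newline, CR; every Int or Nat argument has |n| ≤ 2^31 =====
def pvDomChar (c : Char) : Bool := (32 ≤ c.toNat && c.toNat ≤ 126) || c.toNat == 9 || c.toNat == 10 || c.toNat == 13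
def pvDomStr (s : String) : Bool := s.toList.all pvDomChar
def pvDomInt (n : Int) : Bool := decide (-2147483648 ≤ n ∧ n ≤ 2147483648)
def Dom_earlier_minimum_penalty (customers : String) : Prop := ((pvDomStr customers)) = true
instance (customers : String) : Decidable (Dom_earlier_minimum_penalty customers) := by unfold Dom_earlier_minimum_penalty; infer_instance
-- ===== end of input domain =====

-- B replaces A's per-hour recount of both halves (O(n^2)) by one running-penalty pass (O(n)); same return value.

-- ===== PORT A =====
-- A's final loop: return the first hour whose penalty equals the minimum.
-- The fall-off-the-end case (Python would return None) is unreachable: the minimum is among the values.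
def pvFindFirstA : List (Int × Int) → Int → Int
  | [], _ => 0
  | (h, p) :: rest, m => if p == m then h else pvFindFirstA rest m

def earlier_minimum_penalty (customers : String) : Int :=
  let cs := customers.toList
  let d := (PySem.List.pyRange 0 ((cs.length : Int) + 1) 1).foldl
    (fun (d : PySem.Dict Int Int) hour =>
      let shop_open := PySem.List.slice cs none (some hour)
      let shop_close := PySem.List.slice cs (some hour) none
      let p1 := shop_open.foldl (fun acc c => if c == 'N' then acc + 1 else acc) (0 : Int)
      let p2 := shop_close.foldl (fun acc c => if c == 'Y' then acc + 1 else acc) p1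
      d.insert hour p2) PySem.Dict.empty
  -- min(d.values()): the dict always holds hour 0, so the list is nonempty and .getD 0 is unreachable
  let min_penalty := (PySem.List.min? d.values (fun x => x)).getD 0
  pvFindFirstA d.items min_penalty

-- ===== PORT B =====
def earlier_minimum_penalty_alt (customers : String) : Int :=
  let cs := customers.toList
  let pen0 := cs.foldl (fun a c => if c == 'Y' then a + 1 else a) (0 : Int)
  let st := (PySem.List.enumerate cs 0).foldl
    (fun (s : Int × Int × Int) ic =>
      let pen := if ic.2 == 'Y' then s.1 - 1 else if ic.2 == 'N' then s.1 + 1 else s.1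
      if pen < s.2.1 then (pen, pen, ic.1 + 1) else (pen, s.2.1, s.2.2))
    (pen0, pen0, 0)
  st.2.2

-- ===== PRECONDITION & SPEC =====
def Spec_earlier_minimum_penalty (customers : String) (out : Int) : Prop := out = earlier_minimum_penalty_alt customers
instance (customers : String) (out : Int) : Decidable (Spec_earlier_minimum_penalty customers out) := by unfold Spec_earlier_minimum_penalty; infer_instance

-- ===== CLAIM (what is proved, stated in full; the proofs are below) =====
def Claim_equal_earlier_minimum_penalty : Prop := ∀ (customers : String), Dom_earlier_minimum_penalty customers → Spec_earlier_minimum_penalty customers (earlier_minimum_penalty customers)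

-- ===== LEMMAS AND PROOFS =====

-- penalty when closing after the first h characters
def pvF (cs : List Char) (h : Nat) : Int :=
  ((cs.take h).count 'N' : Int) + ((cs.drop h).count 'Y' : Int)

-- running minimum of pvF over 0..i, and the earliest index attaining it
def pvM (cs : List Char) : Nat → Int
  | 0 => pvF cs 0
  | i + 1 => min (pvM cs i) (pvF cs (i + 1))

def pvK (cs : List Char) : Nat → Nat
  | 0 => 0
  | i + 1 => if pvF cs (i + 1) < pvM cs i then i + 1 else pvK cs i

theorem pvF_step (cs : List Char) (i : Nat) (hi : i < cs.length) :
    pvF cs (i + 1) =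
      if cs[i] == 'Y' then pvF cs i - 1 else if cs[i] == 'N' then pvF cs i + 1 else pvF cs i := by
  have ht : cs.take (i + 1) = cs.take i ++ [cs[i]] := List.take_succ_eq_append_getElem hi
  have hd : cs.drop i = cs[i] :: cs.drop (i + 1) := List.drop_eq_getElem_cons hi
  simp only [pvF, ht, List.count_append, hd, List.count_cons]
  by_cases hY : cs[i] = 'Y' <;> by_cases hN : cs[i] = 'N' <;>
    simp [hY, hN] <;> ring

theorem pvM_le (cs : List Char) (i j : Nat) (hj : j ≤ i) : pvM cs i ≤ pvF cs j := by
  induction i with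
  | zero => interval_cases j; simp [pvM]
  | succ i ih =>
      rcases Nat.lt_or_ge j (i + 1) with h | h
      · exact le_trans (min_le_left _ _) (ih (Nat.lt_succ_iff.mp h))
      · have : j = i + 1 := le_antisymm hj h
        subst this; exact min_le_right _ _

theorem pvK_spec (cs : List Char) (i : Nat) :
    pvK cs i ≤ i ∧ pvF cs (pvK cs i) = pvM cs i ∧ ∀ j < pvK cs i, pvM cs i < pvF cs j := by
  induction i with
  | zero => refine ⟨?_, ?_, ?_⟩ <;> simp [pvK, pvM]
  | succ i ih =>
      obtain ⟨hle, heq, hlt⟩ := ih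
      by_cases h : pvF cs (i + 1) < pvM cs i
      · simp only [pvK, pvM, if_pos h]
        refine ⟨le_refl _, (min_eq_right (le_of_lt h)).symm, ?_⟩
        intro j hj
        have hmle := pvM_le cs i j (by omega)
        calc min (pvM cs i) (pvF cs (i+1)) = pvF cs (i+1) := min_eq_right (le_of_lt h)
          _ < pvM cs i := h
          _ ≤ pvF cs j := hmle
      · have hm : min (pvM cs i) (pvF cs (i + 1)) = pvM cs i := min_eq_left (not_lt.mp h)
        simp only [pvK, pvM, if_neg h, hm]
        exact ⟨by omega, heq, hlt⟩

-- ===== A-side characterisation =====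

theorem pvA_items (cs : List Char) :
    ((PySem.List.pyRange 0 ((cs.length : Int) + 1) 1).foldl
      (fun (d : PySem.Dict Int Int) hour =>
        d.insert hour
          ((PySem.List.slice cs (some hour) none).foldl
            (fun acc c => if c == 'Y' then acc + 1 else acc)
            ((PySem.List.slice cs none (some hour)).foldl
              (fun acc c => if c == 'N' then acc + 1 else acc) (0 : Int))))
      PySem.Dict.empty).items
    = (List.range (cs.length + 1)).map (fun j : Nat => ((j : Int), pvF cs j)) := by
  have h := PySem.Dict.items_foldl_insert_fresh
    (PySem.List.pyRange 0 ((cs.length : Int) + 1) 1) (fun h : Int => h)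
    (fun hour => (PySem.List.slice cs (some hour) none).foldl
        (fun acc c => if c == 'Y' then acc + 1 else acc)
        ((PySem.List.slice cs none (some hour)).foldl
          (fun acc c => if c == 'N' then acc + 1 else acc) (0 : Int)))
    PySem.Dict.empty (by intro a _; simp)
    (by simpa using PySem.List.nodup_pyRange_one 0 ((cs.length : Int) + 1))
  refine h.trans ?_
  have hr : PySem.List.pyRange 0 ((cs.length : Int) + 1) 1
      = (List.range (cs.length + 1)).map (fun k : Nat => (k : Int)) := by
    rw [PySem.List.pyRange_one]
    simp
  rw [hr, List.map_map]
  simp only [PySem.Dict.empty, List.nil_append]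
  refine List.map_congr_left ?_
  intro j _
  simp only [Function.comp]
  rw [PySem.List.slice_to_natCast, PySem.List.slice_from_natCast,
      PySem.List.foldl_beq_add_one, PySem.List.foldl_beq_add_one]
  simp only [pvF, zero_add]

theorem pvM_fold (cs : List Char) (n : Nat) :
    ((List.range n).map (fun j => pvF cs (j + 1))).foldl min (pvF cs 0) = pvM cs n := by
  induction n with
  | zero => rfl
  | succ n ih => rw [List.range_succ, List.map_append, List.foldl_append, ih]; rfl

theorem pvFind_range' (g : Nat → Int) (m : Int) :
    ∀ (len s k : Nat), k < len → g (s + k) = m → (∀ j < k, g (s + j) ≠ m) →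
      pvFindFirstA ((List.range' s len).map (fun j : Nat => ((j : Int), g j))) m = ((s + k : Nat) : Int) := by
  intro len
  induction len with
  | zero => intro s k hk; omega
  | succ len ih =>
      intro s k hk hg hne
      simp only [List.range'_succ, List.map_cons, pvFindFirstA]
      cases k with
      | zero => simp only [Nat.add_zero] at hg; simp [hg]
      | succ k =>
          have h0 : g s ≠ m := by simpa using hne 0 (Nat.succ_pos k)
          rw [if_neg (by simpa using h0)]
          have hrec := ih (s + 1) k (by omega)
            (by rw [show s + 1 + k = s + (k + 1) from by omega]; exact hg)
            (fun j hj => by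
              have := hne (j + 1) (by omega)
              rwa [show s + (j + 1) = s + 1 + j from by omega] at this)
          rw [hrec]; congr 1; omega

-- ===== B-side loop invariant =====

theorem pvB_inv (cs : List Char) (pen0 : Int) (h0 : pen0 = pvF cs 0) :
    ∀ i ≤ cs.length,
      ((PySem.List.enumerate cs 0).take i).foldl
        (fun (s : Int × Int × Int) ic =>
          let pen := if ic.2 == 'Y' then s.1 - 1 else if ic.2 == 'N' then s.1 + 1 else s.1
          if pen < s.2.1 then (pen, pen, ic.1 + 1) else (pen, s.2.1, s.2.2))
        (pen0, pen0, 0)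
      = (pvF cs i, pvM cs i, ((pvK cs i : Nat) : Int)) := by
  intro i
  induction i with
  | zero => intro _; simp [h0, pvM, pvK]
  | succ i ih =>
      intro hlt
      have hi : i < cs.length := by omega
      have hil : i < (PySem.List.enumerate cs 0).length := by
        rw [PySem.List.length_enumerate]; exact hi
      rw [List.take_succ_eq_append_getElem hil, List.foldl_append, ih (by omega)]
      rw [PySem.List.getElem_enumerate]
      simp only [List.foldl_cons, List.foldl_nil]
      have hstep := pvF_step cs i hi
      rw [← hstep]
      by_cases hc : pvF cs (i + 1) < pvM cs i
      · rw [if_pos hc]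
        have h1 : pvM cs (i + 1) = pvF cs (i + 1) := by
          simp only [pvM]; exact min_eq_right (le_of_lt hc)
        have h2 : pvK cs (i + 1) = i + 1 := by simp only [pvK, if_pos hc]
        rw [h1, h2]
        refine Prod.ext rfl (Prod.ext rfl ?_)
        push_cast; ring
      · rw [if_neg hc]
        have h1 : pvM cs (i + 1) = pvM cs i := by
          simp only [pvM]; exact min_eq_left (not_lt.mp hc)
        have h2 : pvK cs (i + 1) = pvK cs i := by simp only [pvK, if_neg hc]
        rw [h1, h2]

-- ===== assembling the two sides =====

theorem pvA_eq (s : String) :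
    earlier_minimum_penalty s = ((pvK s.toList s.toList.length : Nat) : Int) := by
  unfold earlier_minimum_penalty
  dsimp only
  simp only [PySem.Dict.values]
  rw [pvA_items s.toList]
  have hmap2 : ((List.range (s.toList.length + 1)).map
        (fun j : Nat => ((j : Int), pvF s.toList j))).map (·.2)
      = pvF s.toList 0 :: (List.range s.toList.length).map (fun j => pvF s.toList (j + 1)) := by
    rw [List.map_map, List.range_succ_eq_map]
    simp [Function.comp]
  rw [hmap2, PySem.List.min?_id_cons, pvM_fold, Option.getD_some]
  obtain ⟨hK, hF, hlt⟩ := pvK_spec s.toList s.toList.length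
  have hfind := pvFind_range' (pvF s.toList) (pvM s.toList s.toList.length)
      (s.toList.length + 1) 0 (pvK s.toList s.toList.length)
      (by omega) (by simpa using hF) (by intro j hj; simpa using (ne_of_gt (hlt j hj)))
  rw [List.range_eq_range']
  simpa using hfind

theorem pvB_eq (s : String) :
    earlier_minimum_penalty_alt s = ((pvK s.toList s.toList.length : Nat) : Int) := by
  unfold earlier_minimum_penalty_alt
  dsimp only
  set cs := s.toList with hcs
  have h0 : cs.foldl (fun a c => if c == 'Y' then a + 1 else a) (0 : Int) = pvF cs 0 := by
    rw [PySem.List.foldl_beq_add_one]; simp [pvF]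
  have hinv := pvB_inv cs _ h0 cs.length (le_refl _)
  rw [List.take_of_length_le (by rw [PySem.List.length_enumerate])] at hinv
  rw [hinv]

-- ===== VERDICT (by name: the statement is the Claim_ definition above) =====
theorem earlier_minimum_penalty_spec : Claim_equal_earlier_minimum_penalty := by
  intro customers _
  unfold Spec_earlier_minimum_penalty
  rw [pvA_eq, pvB_eq]
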